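-- pv_equiv track=rewrite | github.com/jakobytes/elias-1848 | code/map_columns.py | map_fieldnames
-- ===== SOURCE A (Python) =====
-- def map_fieldnames(fieldnames, cols_from, cols_to):
--     result = []
--     added = False
--     for f in fieldnames:
--         # insert cols_to at the index of the first column of cols_from
--         if f in cols_from:
--             if not added:
--                 result.extend(cols_to)
--                 added = True
--         else:
--             result.append(f)
--     return result
-- ===== SOURCE B (Python) =====
-- def map_fieldnames(fieldnames, cols_from, cols_to):
--     kept = [f for f in fieldnames if f not in cols_from]
--     pos = next((i for i, f in enumerate(fieldnames) if f in cols_from), None)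
--     if pos is None:
--         return kept
--     return kept[:pos] + list(cols_to) + kept[pos:]
-- ===== Notes on version B (the rewrite author's own statement) =====
-- stated objective: alternative
-- what changed: Replaces the flag-driven accumulation loop with a find-first-match-index / filter / slice-and-concatenate decomposition.
import Mathlib
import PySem

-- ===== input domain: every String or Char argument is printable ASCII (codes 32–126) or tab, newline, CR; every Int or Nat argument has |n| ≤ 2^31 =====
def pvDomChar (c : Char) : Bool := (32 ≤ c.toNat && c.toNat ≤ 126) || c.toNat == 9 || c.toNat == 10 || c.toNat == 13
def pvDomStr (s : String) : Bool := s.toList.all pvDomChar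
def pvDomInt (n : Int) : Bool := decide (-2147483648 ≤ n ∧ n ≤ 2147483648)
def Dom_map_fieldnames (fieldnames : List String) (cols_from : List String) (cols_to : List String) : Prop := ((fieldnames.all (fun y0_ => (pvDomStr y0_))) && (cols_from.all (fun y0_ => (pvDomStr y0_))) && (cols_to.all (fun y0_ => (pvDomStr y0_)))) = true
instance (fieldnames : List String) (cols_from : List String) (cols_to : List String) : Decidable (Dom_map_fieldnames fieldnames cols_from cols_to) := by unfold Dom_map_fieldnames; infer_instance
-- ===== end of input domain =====

-- B replaces A's flag-driven accumulation loop with a find-index / filter / slice-concatenate decomposition (alternative, same cost).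


-- ===== PORT A =====
-- the for-loop of A as structural recursion over fieldnames with state (result, added)
def map_fieldnames_goA (cols_from cols_to : List String) (result : List String) (added : Bool) : List String → List String
  | [] => result
  | f :: rest =>
    if cols_from.contains f then
      if added then map_fieldnames_goA cols_from cols_to result added rest
      else map_fieldnames_goA cols_from cols_to (result ++ cols_to) true rest
    else map_fieldnames_goA cols_from cols_to (result ++ [f]) added rest

def map_fieldnames (fieldnames : List String) (cols_from : List String) (cols_to : List String) : List String :=
  map_fieldnames_goA cols_from cols_to [] false fieldnames

-- ===== PORT B =====
def map_fieldnames_alt (fieldnames : List String) (cols_from : List String) (cols_to : List String) : List String :=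
  let kept := fieldnames.filter (fun f => !cols_from.contains f)
  match fieldnames.findIdx? (fun f => cols_from.contains f) with
  | none => kept
  | some pos => kept.take pos ++ cols_to ++ kept.drop pos

-- ===== PRECONDITION & SPEC =====
def Spec_map_fieldnames (fieldnames : List String) (cols_from : List String) (cols_to : List String) (out : List String) : Prop := out = map_fieldnames_alt fieldnames cols_from cols_to
instance (fieldnames : List String) (cols_from : List String) (cols_to : List String) (out : List String) : Decidable (Spec_map_fieldnames fieldnames cols_from cols_to out) := by unfold Spec_map_fieldnames; infer_instance

-- ===== CLAIM (what is proved, stated in full; the proofs are below) =====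
def Claim_equal_map_fieldnames : Prop := ∀ (fieldnames : List String) (cols_from : List String) (cols_to : List String), Dom_map_fieldnames fieldnames cols_from cols_to → Spec_map_fieldnames fieldnames cols_from cols_to (map_fieldnames fieldnames cols_from cols_to)

-- ===== LEMMAS AND PROOFS =====
-- once added = true, the loop just appends the kept (non-cols_from) fields
theorem goA_true (cols_from cols_to : List String) :
    ∀ (fs result : List String),
      map_fieldnames_goA cols_from cols_to result true fs
        = result ++ fs.filter (fun f => !cols_from.contains f) := by
  intro fs
  induction fs with
  | nil => intro result; simp [map_fieldnames_goA]
  | cons f rest ih =>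
    intro result
    by_cases h : f ∈ cols_from <;>
      simp [map_fieldnames_goA, h, ih]

-- with added = false, the loop computes B's decomposition on the remaining fields
theorem goA_false (cols_from cols_to : List String) :
    ∀ (fs result : List String),
      map_fieldnames_goA cols_from cols_to result false fs
        = result ++ map_fieldnames_alt fs cols_from cols_to := by
  intro fs
  induction fs with
  | nil => intro result; simp [map_fieldnames_goA, map_fieldnames_alt]
  | cons f rest ih =>
    intro result
    by_cases h : f ∈ cols_from
    · simp [map_fieldnames_goA, h, goA_true, map_fieldnames_alt, List.findIdx?_cons]
    · simp only [map_fieldnames_goA, List.contains_eq_mem, h, decide_false,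
        Bool.false_eq_true, if_false, ih]
      simp only [map_fieldnames_alt, List.findIdx?_cons, h, decide_false,
        Bool.false_eq_true, if_false, List.filter_cons, Bool.not_false,
        List.contains_eq_mem]
      cases hfind : rest.findIdx? (fun f => decide (f ∈ cols_from)) with
      | none => simp
      | some p => simp [List.take_succ_cons, List.drop_succ_cons]

-- ===== VERDICT (by name: the statement is the Claim_ definition above) =====
theorem map_fieldnames_spec : Claim_equal_map_fieldnames := by
  intro fieldnames cols_from cols_to _
  show map_fieldnames fieldnames cols_from cols_to = map_fieldnames_alt fieldnames cols_from cols_to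
  simpa [map_fieldnames] using goA_false cols_from cols_to fieldnames []
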